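-- pv_equiv track=rewrite | github.com/shipleyzach-code/Vector-Fitness-Weekly-Schedule-v1 | Vector_Weekly_Scheduler_v1.py | adjust_for_goal
-- ===== SOURCE A (Python) =====
-- def adjust_for_goal(template, experience, goal):
--     template = template.copy()
--
--     # Advanced hybrid run assignment
--     if goal == "hybrid" and experience == "advanced":
--         run_days = [i for i, w in enumerate(template) if "Run" in w]
--         for idx, run_idx in enumerate(run_days):
--             if idx == 0:
--                 template[run_idx] = "Easy Run"
--             elif idx == 1:
--                 template[run_idx] = "Speed Work"
--             else:
--                 template[run_idx] = "Long Run"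
--         return template[:len(template)]
--
--     # Intermediate running goal: 2 easy runs + 1 long run
--     if goal == "running" and experience == "intermediate":
--         run_days = [i for i, w in enumerate(template) if "Run" in w]
--         for idx, run_idx in enumerate(run_days):
--             if idx < 2:
--                 template[run_idx] = "Easy Run"
--             else:
--                 template[run_idx] = "Long Run"
--         return template[:len(template)]
--
--     # Beginner running goal
--     if goal == "running" and experience == "beginner":
--         return ["Easy Run (Longer)" if "Easy Run" in x else x for x in template]
--
--     # Strength goal adjustments
--     if goal == "strength":
--         template = ["Lift" if "Run" in x else x for x in template]
--
--     # Other running/hybrid adjustments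
--     if goal in ["running", "hybrid"] and experience == "advanced":
--         for i, w in enumerate(template):
--             if w == "Run":
--                 template[i] = "Easy Run"
--
--     return template
-- ===== SOURCE B (Python) =====
-- def adjust_for_goal(template, experience, goal):
--     # Single pass with a run counter instead of collecting run indices first.
--     if goal == "hybrid" and experience == "advanced":
--         out, runs = [], 0
--         for w in template:
--             if "Run" in w:
--                 out.append("Easy Run" if runs == 0 else "Speed Work" if runs == 1 else "Long Run")
--                 runs += 1
--             else:
--                 out.append(w)
--         return out
--
--     if goal == "running" and experience == "intermediate":
--         out, runs = [], 0
--         for w in template: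
--             if "Run" in w:
--                 out.append("Easy Run" if runs < 2 else "Long Run")
--                 runs += 1
--             else:
--                 out.append(w)
--         return out
--
--     if goal == "running" and experience == "beginner":
--         return ["Easy Run (Longer)" if "Easy Run" in x else x for x in template]
--
--     if goal == "strength":
--         return ["Lift" if "Run" in x else x for x in template]
--
--     if goal == "running" and experience == "advanced":
--         return ["Easy Run" if x == "Run" else x for x in template]
--
--     return list(template)
-- ===== Notes on version B (the rewrite author's own statement) =====
-- stated objective: simpler
-- what changed: The two index-collection-then-assignment branches become one pass with a run counter, and the strength/advanced tail of mutating branches becomes a flat early-return chain of comprehensions (strength and running+advanced cannot overlap, and hybrid+advanced already returned).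
import Mathlib
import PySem

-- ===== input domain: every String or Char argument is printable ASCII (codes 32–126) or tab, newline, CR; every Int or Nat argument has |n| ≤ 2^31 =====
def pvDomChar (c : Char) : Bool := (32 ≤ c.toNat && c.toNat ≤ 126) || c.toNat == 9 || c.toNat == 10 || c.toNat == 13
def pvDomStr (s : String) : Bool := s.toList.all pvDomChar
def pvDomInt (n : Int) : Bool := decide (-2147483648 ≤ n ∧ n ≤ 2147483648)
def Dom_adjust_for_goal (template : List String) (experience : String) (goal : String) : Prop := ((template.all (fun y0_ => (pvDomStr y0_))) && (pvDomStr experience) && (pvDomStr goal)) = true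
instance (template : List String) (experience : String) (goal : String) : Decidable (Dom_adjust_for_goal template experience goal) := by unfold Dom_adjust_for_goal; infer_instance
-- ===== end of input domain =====

-- ===== PORT A =====
-- B merges each collect-run-indices-then-assign pair of loops into one counting pass
-- and flattens the mutating strength/advanced tail into disjoint comprehension branches (simpler).
def adjust_for_goal (template : List String) (experience : String) (goal : String) : List String :=
  if goal == "hybrid" && experience == "advanced" then
    let run_days := ((PySem.List.enumerate template 0).filter (fun p => PySem.Str.isIn "Run" p.2)).map (fun p => p.1)
    let t := (PySem.List.enumerate run_days 0).foldl (fun t p =>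
        if p.1 == 0 then PySem.List.pySetD t p.2 "Easy Run"
        else if p.1 == 1 then PySem.List.pySetD t p.2 "Speed Work"
        else PySem.List.pySetD t p.2 "Long Run") template
    PySem.List.slice t none (some (PySem.List.len t))
  else if goal == "running" && experience == "intermediate" then
    let run_days := ((PySem.List.enumerate template 0).filter (fun p => PySem.Str.isIn "Run" p.2)).map (fun p => p.1)
    let t := (PySem.List.enumerate run_days 0).foldl (fun t p =>
        if p.1 < 2 then PySem.List.pySetD t p.2 "Easy Run"
        else PySem.List.pySetD t p.2 "Long Run") template
    PySem.List.slice t none (some (PySem.List.len t))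
  else if goal == "running" && experience == "beginner" then
    template.map (fun x => if PySem.Str.isIn "Easy Run" x then "Easy Run (Longer)" else x)
  else
    let template' := if goal == "strength" then template.map (fun x => if PySem.Str.isIn "Run" x then "Lift" else x) else template
    if (goal == "running" || goal == "hybrid") && experience == "advanced" then
      -- 'for i, w in enumerate(template): if w == "Run": template[i] = "Easy Run"' — exact: the loop only
      -- overwrites the index the iterator is at, so later reads see the original elements.
      (PySem.List.enumerate template' 0).foldl (fun t p =>
        if p.2 == "Run" then PySem.List.pySetD t p.1 "Easy Run" else t) template'
    else template'

-- ===== PORT B =====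
def adjust_for_goal_alt (template : List String) (experience : String) (goal : String) : List String :=
  if goal == "hybrid" && experience == "advanced" then
    (template.foldl (fun (st : List String × Nat) w =>
      if PySem.Str.isIn "Run" w then
        (st.1 ++ [if st.2 == 0 then "Easy Run" else if st.2 == 1 then "Speed Work" else "Long Run"], st.2 + 1)
      else (st.1 ++ [w], st.2)) ([], 0)).1
  else if goal == "running" && experience == "intermediate" then
    (template.foldl (fun (st : List String × Nat) w =>
      if PySem.Str.isIn "Run" w then
        (st.1 ++ [if st.2 < 2 then "Easy Run" else "Long Run"], st.2 + 1)
      else (st.1 ++ [w], st.2)) ([], 0)).1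
  else if goal == "running" && experience == "beginner" then
    template.map (fun x => if PySem.Str.isIn "Easy Run" x then "Easy Run (Longer)" else x)
  else if goal == "strength" then
    template.map (fun x => if PySem.Str.isIn "Run" x then "Lift" else x)
  else if goal == "running" && experience == "advanced" then
    template.map (fun x => if x == "Run" then "Easy Run" else x)
  else
    template

-- ===== PRECONDITION & SPEC =====
def Spec_adjust_for_goal (template : List String) (experience : String) (goal : String) (out : List String) : Prop := out = adjust_for_goal_alt template experience goal
instance (template : List String) (experience : String) (goal : String) (out : List String) : Decidable (Spec_adjust_for_goal template experience goal out) := by unfold Spec_adjust_for_goal; infer_instance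

-- ===== CLAIM (what is proved, stated in full; the proofs are below) =====
def Claim_equal_adjust_for_goal : Prop := ∀ (template : List String) (experience : String) (goal : String), Dom_adjust_for_goal template experience goal → Spec_adjust_for_goal template experience goal (adjust_for_goal template experience goal)

-- ===== LEMMAS AND PROOFS =====

-- rank-labelled single pass (B's shape), Nat counter
def pvRelabel (f : Nat → String) : List String → Nat → List String
  | [], _ => []
  | w :: ws, k =>
    if PySem.Str.isIn "Run" w then f k :: pvRelabel f ws (k + 1) else w :: pvRelabel f ws k

-- rank-labelled single pass, Int rank (A's shape)
def pvRelabelI (g : Int → String) : List String → Int → List String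
  | [], _ => []
  | w :: ws, r =>
    if PySem.Str.isIn "Run" w then g r :: pvRelabelI g ws (r + 1) else w :: pvRelabelI g ws r

def pvRunIdxs (t : List String) (s : Int) : List Int :=
  ((PySem.List.enumerate t s).filter (fun p => PySem.Str.isIn "Run" p.2)).map (fun p => p.1)

theorem pvRunIdxs_nil (s : Int) : pvRunIdxs [] s = [] := rfl

theorem pvRunIdxs_cons (w : String) (l : List String) (s : Int) :
    pvRunIdxs (w :: l) s =
      (if PySem.Str.isIn "Run" w then [s] else []) ++ pvRunIdxs l (s + 1) := by
  simp [pvRunIdxs, PySem.List.enumerate_cons, List.filter_cons]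
  split <;> simp

theorem pvRunIdxs_shift (l : List String) : ∀ s : Int,
    pvRunIdxs l s = (pvRunIdxs l 0).map (fun i => i + s) := by
  induction l with
  | nil => intro s; simp [pvRunIdxs_nil]
  | cons w l ih =>
    intro s
    rw [pvRunIdxs_cons, pvRunIdxs_cons]
    norm_num
    rw [ih (s + 1), ih 1]
    simp only [List.map_map]
    congr 1
    · split <;> simp
    · apply List.map_congr_left; intro i _; simp; ring

theorem pvRunIdxs_nonneg (l : List String) (i : Int) (h : i ∈ pvRunIdxs l 0) : 0 ≤ i := by
  simp [pvRunIdxs] at h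
  obtain ⟨w, hm, -⟩ := h
  rw [PySem.List.mem_enumerate_iff] at hm
  obtain ⟨k, hk, he⟩ := hm
  cases he; positivity

theorem pvSetD_cons_succ (w : String) (t : List String) (i : Int) (h : 0 ≤ i) (v : String) :
    PySem.List.pySetD (w :: t) (i + 1) v = w :: PySem.List.pySetD t i v := by
  lift i to ℕ using h with n
  have h1 : ((n : Int) + 1) = ((n + 1 : ℕ) : Int) := by push_cast; ring
  rw [h1, PySem.List.pySetD_natCast, PySem.List.pySetD_natCast]
  rfl

theorem pvShiftFold (g : Int → String) : ∀ (ids : List Int), (∀ i ∈ ids, 0 ≤ i) →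
    ∀ (w : String) (t : List String) (r : Int),
    (PySem.List.enumerate (ids.map (fun i => i + 1)) r).foldl
        (fun t p => PySem.List.pySetD t p.2 (g p.1)) (w :: t)
      = w :: (PySem.List.enumerate ids r).foldl
        (fun t p => PySem.List.pySetD t p.2 (g p.1)) t := by
  intro ids
  induction ids with
  | nil => intro _ w t r; simp
  | cons i ids ih =>
    intro h w t r
    simp only [List.map_cons, PySem.List.enumerate_cons, List.foldl_cons]
    rw [pvSetD_cons_succ w t i (h i (by simp)) (g r)]
    exact ih (fun j hj => h j (by simp [hj])) w _ (r + 1)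

theorem pvFoldA (g : Int → String) : ∀ (ws : List String) (r : Int),
    (PySem.List.enumerate (pvRunIdxs ws 0) r).foldl
        (fun t p => PySem.List.pySetD t p.2 (g p.1)) ws = pvRelabelI g ws r := by
  intro ws
  induction ws with
  | nil => intro r; simp [pvRunIdxs_nil, pvRelabelI]
  | cons w l ih =>
    intro r
    rw [pvRunIdxs_cons, show ((0 : Int) + 1) = 1 from by norm_num, pvRunIdxs_shift l 1]
    by_cases hw : PySem.Str.isIn "Run" w
    · rw [if_pos hw, List.singleton_append, PySem.List.enumerate_cons, List.foldl_cons]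
      have h0 : PySem.List.pySetD (w :: l) (0 : Int) (g r) = g r :: l := by
        rw [show (0 : Int) = ((0 : ℕ) : Int) from rfl, PySem.List.pySetD_natCast]; rfl
      rw [h0, pvShiftFold g (pvRunIdxs l 0) (pvRunIdxs_nonneg l) (g r) l (r + 1), ih (r + 1)]
      simp only [pvRelabelI]
      rw [if_pos hw]
    · rw [if_neg hw, List.nil_append,
        pvShiftFold g (pvRunIdxs l 0) (pvRunIdxs_nonneg l) w l r, ih r]
      simp only [pvRelabelI]
      rw [if_neg hw]

theorem pvFoldB (f : Nat → String) : ∀ (ws acc : List String) (k : Nat),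
    (ws.foldl (fun (st : List String × Nat) w =>
        if PySem.Str.isIn "Run" w then (st.1 ++ [f st.2], st.2 + 1)
        else (st.1 ++ [w], st.2)) (acc, k)).1 = acc ++ pvRelabel f ws k := by
  intro ws
  induction ws with
  | nil => intro acc k; simp [pvRelabel]
  | cons w l ih =>
    intro acc k
    by_cases hw : PySem.Str.isIn "Run" w
    · rw [List.foldl_cons, if_pos hw, ih (acc ++ [f k]) (k + 1)]
      simp only [pvRelabel]
      rw [if_pos hw]
      simp
    · rw [List.foldl_cons, if_neg hw, ih (acc ++ [w]) k]
      simp only [pvRelabel]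
      rw [if_neg hw]
      simp

theorem pvRelabelI_eq (g : Int → String) (f : Nat → String) (h : ∀ k : Nat, g k = f k) :
    ∀ (ws : List String) (k : Nat), pvRelabelI g ws (k : Int) = pvRelabel f ws k := by
  intro ws
  induction ws with
  | nil => intro k; rfl
  | cons w l ih =>
    intro k
    by_cases hw : PySem.Str.isIn "Run" w
    · simp only [pvRelabelI, pvRelabel]
      rw [if_pos hw, if_pos hw, h k,
        show ((k : Int) + 1) = ((k + 1 : Nat) : Int) by push_cast; ring, ih (k + 1)]
    · simp only [pvRelabelI, pvRelabel]
      rw [if_neg hw, if_neg hw, ih k]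


theorem pvSliceFull (t : List String) :
    PySem.List.slice t none (some (PySem.List.len t)) = t := by
  rw [PySem.List.slice_to]
  · simp [PySem.List.len_eq]
  · simp [PySem.List.len_eq]

theorem pvEnumShift {α : Type} (l : List α) : ∀ s : Int,
    PySem.List.enumerate l (s + 1) = (PySem.List.enumerate l s).map (fun p => (p.1 + 1, p.2)) := by
  induction l with
  | nil => intro s; simp
  | cons x l ih =>
    intro s
    rw [PySem.List.enumerate_cons, PySem.List.enumerate_cons, ih (s + 1)]
    simp

theorem pvEnumNonneg {α : Type} (l : List α) (p : Int × α) (h : p ∈ PySem.List.enumerate l 0) :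
    0 ≤ p.1 := by
  rw [PySem.List.mem_enumerate_iff] at h
  obtain ⟨k, hk, he⟩ := h
  cases he; positivity

theorem pvShiftFoldC : ∀ (ps : List (Int × String)), (∀ p ∈ ps, 0 ≤ p.1) →
    ∀ (x : String) (u : List String),
    (ps.map (fun p => (p.1 + 1, p.2))).foldl
        (fun u p => if p.2 == "Run" then PySem.List.pySetD u p.1 "Easy Run" else u) (x :: u)
      = x :: ps.foldl
        (fun u p => if p.2 == "Run" then PySem.List.pySetD u p.1 "Easy Run" else u) u := by
  intro ps
  induction ps with
  | nil => intro _ x u; simp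
  | cons p ps ih =>
    intro h x u
    simp only [List.map_cons, List.foldl_cons]
    by_cases hp : p.2 == "Run"
    · rw [if_pos hp, pvSetD_cons_succ x u p.1 (h p (by simp)) "Easy Run", if_pos hp]
      exact ih (fun q hq => h q (by simp [hq])) x _
    · rw [if_neg hp, if_neg hp]
      exact ih (fun q hq => h q (by simp [hq])) x u

theorem pvFoldC : ∀ t : List String,
    (PySem.List.enumerate t 0).foldl
        (fun u p => if p.2 == "Run" then PySem.List.pySetD u p.1 "Easy Run" else u) t
      = t.map (fun x => if x == "Run" then "Easy Run" else x) := by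
  intro t
  induction t with
  | nil => rfl
  | cons w l ih =>
    simp only [PySem.List.enumerate_cons, List.foldl_cons, List.map_cons]
    have h1 : (if (w == "Run") = true then PySem.List.pySetD (w :: l) (0 : Int) "Easy Run" else w :: l)
        = (if w == "Run" then "Easy Run" else w) :: l := by
      by_cases hw : w == "Run"
      · simp only [hw, if_true]
        rw [show (0 : Int) = ((0 : ℕ) : Int) from rfl, PySem.List.pySetD_natCast]
        rfl
      · simp [hw]
    rw [h1, show (0 : Int) + 1 = 0 + 1 from rfl, pvEnumShift l 0,
      pvShiftFoldC (PySem.List.enumerate l 0) (pvEnumNonneg l) _ l, ih]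

theorem pvLabel1 (k : Nat) :
    (if (k : Int) == 0 then "Easy Run" else if (k : Int) == 1 then "Speed Work" else "Long Run")
      = (if k == 0 then "Easy Run" else if k == 1 then "Speed Work" else "Long Run") := by
  rcases k with _ | _ | k
  · rfl
  · rfl
  · have h0 : ¬(((k : Int) + 1 + 1) = 0) := by omega
    have h1 : ¬(((k : Int) + 1 + 1) = 1) := by omega
    simp [h0, h1]

theorem pvLabel2 (k : Nat) :
    (if (k : Int) < 2 then "Easy Run" else "Long Run")
      = (if k < 2 then "Easy Run" else "Long Run") := by
  by_cases hk : k < 2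
  · rw [if_pos (by exact_mod_cast hk), if_pos hk]
  · rw [if_neg (by omega), if_neg hk]

-- ===== VERDICT (by name: the statement is the Claim_ definition above) =====
theorem adjust_for_goal_spec : Claim_equal_adjust_for_goal := by
  intro template experience goal _
  unfold Spec_adjust_for_goal adjust_for_goal adjust_for_goal_alt
  by_cases h1 : (goal == "hybrid" && experience == "advanced") = true
  · rw [if_pos h1, if_pos h1]
    dsimp only
    rw [show ((PySem.List.enumerate template 0).filter
          (fun p => PySem.Str.isIn "Run" p.2)).map (fun p => p.1) = pvRunIdxs template 0 from rfl,
      show (fun (t : List String) (p : Int × Int) =>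
          if p.1 == 0 then PySem.List.pySetD t p.2 "Easy Run"
          else if p.1 == 1 then PySem.List.pySetD t p.2 "Speed Work"
          else PySem.List.pySetD t p.2 "Long Run")
        = (fun (t : List String) (p : Int × Int) => PySem.List.pySetD t p.2
            (if p.1 == 0 then "Easy Run" else if p.1 == 1 then "Speed Work" else "Long Run"))
        from by funext t p; split_ifs <;> rfl,
      pvFoldA (fun i => if i == 0 then "Easy Run" else if i == 1 then "Speed Work" else "Long Run")
        template 0,
      pvFoldB (fun k => if k == 0 then "Easy Run" else if k == 1 then "Speed Work" else "Long Run")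
        template [] 0,
      pvSliceFull, List.nil_append]
    exact pvRelabelI_eq _ _ pvLabel1 template 0
  · rw [if_neg h1, if_neg h1]
    by_cases h2 : (goal == "running" && experience == "intermediate") = true
    · rw [if_pos h2, if_pos h2]
      dsimp only
      rw [show ((PySem.List.enumerate template 0).filter
            (fun p => PySem.Str.isIn "Run" p.2)).map (fun p => p.1) = pvRunIdxs template 0 from rfl,
        show (fun (t : List String) (p : Int × Int) =>
            if p.1 < 2 then PySem.List.pySetD t p.2 "Easy Run"
            else PySem.List.pySetD t p.2 "Long Run")
          = (fun (t : List String) (p : Int × Int) => PySem.List.pySetD t p.2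
              (if p.1 < 2 then "Easy Run" else "Long Run"))
          from by funext t p; split_ifs <;> rfl,
        pvFoldA (fun i => if i < 2 then "Easy Run" else "Long Run") template 0,
        pvFoldB (fun k => if k < 2 then "Easy Run" else "Long Run") template [] 0,
        pvSliceFull, List.nil_append]
      exact pvRelabelI_eq _ _ pvLabel2 template 0
    · rw [if_neg h2, if_neg h2]
      by_cases h3 : (goal == "running" && experience == "beginner") = true
      · rw [if_pos h3, if_pos h3]
      · rw [if_neg h3, if_neg h3]
        by_cases h4 : (goal == "strength") = true
        · have hg : goal = "strength" := by simpa using h4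
          have h5 : ((goal == "running" || goal == "hybrid") && experience == "advanced") = false := by
            subst hg; simp
          rw [if_pos h4]
          simp only [h4, h5, Bool.false_eq_true, if_false, if_true]
        · have h4' : (goal == "strength") = false := by simpa using h4
          rw [if_neg h4]
          by_cases h5b : (goal == "running" && experience == "advanced") = true
          · rw [if_pos h5b]
            have h5 : ((goal == "running" || goal == "hybrid") && experience == "advanced") = true := by
              cases hx : (goal == "running") <;> cases hy : (experience == "advanced") <;> simp_all
            simp only [h4', Bool.false_eq_true, if_false, h5, if_true]
            exact pvFoldC template
          · rw [if_neg h5b]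
            have h5b' : (goal == "running" && experience == "advanced") = false := by simpa using h5b
            have h1' : (goal == "hybrid" && experience == "advanced") = false := by simpa using h1
            have h5 : ((goal == "running" || goal == "hybrid") && experience == "advanced") = false := by
              cases hx : (goal == "running") <;> cases hy : (goal == "hybrid") <;>
                cases hz : (experience == "advanced") <;> simp_all
            simp only [h4', h5, Bool.false_eq_true, if_false]
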